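-- pv_equiv track=rewrite | github.com/viktorinkov/healthmap_ai | backend_python/insights/safety_validator.py | validate_user_question
-- ===== SOURCE A (Python) =====
-- from typing import Tuple, List
--
-- def validate_user_question(question: str) -> Tuple[bool, str]:
--     """Validate user questions for appropriateness"""
--     question_lower = question.lower()
--
--     # Check for inappropriate medical questions
--     inappropriate_patterns = [
--         'do i have', 'am i sick', 'what disease', 'should i take medication',
--         'diagnose me', 'what\'s wrong with me', 'medical emergency'
--     ]
--
--     for pattern in inappropriate_patterns:
--         if pattern in question_lower:
--             return False, "I can provide wellness insights, but please consult healthcare providers for medical questions."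
--
--     return True, question
-- ===== SOURCE B (Python) =====
-- def validate_user_question(question):
--     """Validate user questions for appropriateness"""
--     inappropriate_patterns = [
--         'do i have', 'am i sick', 'what disease', 'should i take medication',
--         'diagnose me', 'what\'s wrong with me', 'medical emergency'
--     ]
--     q = question.lower()
--     # single left-to-right sweep: at each position, test every pattern as a prefix
--     for i in range(len(q) + 1):
--         tail = q[i:]
--         for pattern in inappropriate_patterns:
--             if tail.startswith(pattern):
--                 return False, "I can provide wellness insights, but please consult healthcare providers for medical questions."
--     return True, question
-- ===== Notes on version B (the rewrite author's own statement) =====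
-- stated objective: alternative
-- what changed: Replaces A's per-pattern substring-search loop by a single left-to-right sweep over the positions of the lowered question, testing every pattern as a prefix at each position (loop nesting inverted).
import Mathlib
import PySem

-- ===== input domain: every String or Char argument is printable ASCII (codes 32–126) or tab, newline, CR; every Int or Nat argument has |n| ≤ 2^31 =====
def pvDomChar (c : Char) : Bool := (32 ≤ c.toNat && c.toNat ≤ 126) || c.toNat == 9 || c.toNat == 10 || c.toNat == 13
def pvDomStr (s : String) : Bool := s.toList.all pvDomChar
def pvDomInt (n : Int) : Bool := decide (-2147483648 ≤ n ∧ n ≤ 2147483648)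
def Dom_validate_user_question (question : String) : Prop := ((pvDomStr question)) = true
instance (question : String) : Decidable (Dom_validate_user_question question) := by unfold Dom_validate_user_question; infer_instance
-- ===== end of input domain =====

-- B replaces A's per-pattern substring-search loop by a single left-to-right sweep over the
-- positions of the lowered question, testing every pattern as a prefix at each position.

-- ===== PORT A =====
def aPatterns : List String :=
  ["do i have", "am i sick", "what disease", "should i take medication",
   "diagnose me", "what's wrong with me", "medical emergency"]

def aMsg : String :=
  "I can provide wellness insights, but please consult healthcare providers for medical questions."

-- the 'for pattern in inappropriate_patterns' loop with its early return
def aLoop (question question_lower : String) : List String → Bool × String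
  | [] => (true, question)
  | p :: ps =>
    if PySem.Str.isIn p question_lower then (false, aMsg)
    else aLoop question question_lower ps

def validate_user_question (question : String) : Bool × String :=
  let question_lower := PySem.Str.lower question
  aLoop question question_lower aPatterns

-- ===== PORT B =====
def bPatterns : List String :=
  ["do i have", "am i sick", "what disease", "should i take medication",
   "diagnose me", "what's wrong with me", "medical emergency"]

def bMsg : String :=
  "I can provide wellness insights, but please consult healthcare providers for medical questions."

-- Source B's sweep 'for i in range(len(q)+1): tail = q[i:] …', as structural recursion over the tails
def bScan (ps : List String) : List Char → Bool
  | [] => ps.any (fun p => PySem.Chars.startswith [] p.toList)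
  | c :: rest =>
    ps.any (fun p => PySem.Chars.startswith (c :: rest) p.toList) || bScan ps rest

def validate_user_question_alt (question : String) : Bool × String :=
  let q := PySem.Str.lower question
  if bScan bPatterns q.toList then (false, bMsg) else (true, question)

-- ===== PRECONDITION & SPEC =====
def Spec_validate_user_question (question : String) (out : Bool × String) : Prop := out = validate_user_question_alt question
instance (question : String) (out : Bool × String) : Decidable (Spec_validate_user_question question out) := by unfold Spec_validate_user_question; infer_instance

-- ===== CLAIM (what is proved, stated in full; the proofs are below) =====
def Claim_equal_validate_user_question : Prop := ∀ (question : String), Dom_validate_user_question question → Spec_validate_user_question question (validate_user_question question)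

-- ===== LEMMAS AND PROOFS =====

-- B's positional sweep decides "some pattern occurs somewhere", i.e. an isIn for each pattern
theorem bScan_eq_any_isIn (ps : List String) (cs : List Char) :
    bScan ps cs = ps.any (fun p => PySem.Chars.isIn p.toList cs) := by
  induction cs with
  | nil =>
    simp only [bScan]
    congr 1
    funext p
    rw [Bool.eq_iff_iff, PySem.Chars.startswith_iff, PySem.Chars.isIn_iff_infix]
    simp
  | cons c rest ih =>
    simp only [bScan, ih]
    rw [Bool.eq_iff_iff]
    simp only [Bool.or_eq_true, List.any_eq_true]
    constructor
    · rintro (⟨p, hp, h⟩ | ⟨p, hp, h⟩)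
      · exact ⟨p, hp, by
          rw [PySem.Chars.isIn_iff_infix]
          exact ((PySem.Chars.startswith_iff (c :: rest) p.toList).1 h).isInfix⟩
      · exact ⟨p, hp, by
          rw [PySem.Chars.isIn_iff_infix] at h ⊢
          exact h.trans (List.suffix_cons c rest).isInfix⟩
    · rintro ⟨p, hp, h⟩
      rw [PySem.Chars.isIn_iff_infix, List.infix_cons_iff] at h
      rcases h with h | h
      · exact Or.inl ⟨p, hp, (PySem.Chars.startswith_iff (c :: rest) p.toList).2 h⟩
      · exact Or.inr ⟨p, hp, (PySem.Chars.isIn_iff_infix p.toList rest).2 h⟩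

-- A's loop is the same "any pattern occurs" decision, with the same two result pairs
theorem aLoop_eq (question question_lower : String) (ps : List String) :
    aLoop question question_lower ps =
      if ps.any (fun p => PySem.Chars.isIn p.toList question_lower.toList) then (false, aMsg)
      else (true, question) := by
  induction ps with
  | nil => simp [aLoop]
  | cons p ps ih =>
    simp only [aLoop, ih, List.any_cons]
    by_cases h : PySem.Str.isIn p question_lower
    · have h' : PySem.Chars.isIn p.toList question_lower.toList = true := by
        simpa [PySem.Str.isIn] using h
      simp [h']
    · have h' : PySem.Chars.isIn p.toList question_lower.toList = false := by
        simpa [PySem.Str.isIn] using eq_false_of_ne_true h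
      simp [h']

-- ===== VERDICT (by name: the statement is the Claim_ definition above) =====
theorem validate_user_question_spec : Claim_equal_validate_user_question := by
  intro question _
  show _ = _
  simp only [validate_user_question, validate_user_question_alt,
    aLoop_eq, bScan_eq_any_isIn]
  have hpat : bPatterns = aPatterns := rfl
  have hmsg : bMsg = aMsg := rfl
  rw [hpat, hmsg]
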